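-- pv_equiv track=rewrite | github.com/learnwithjuni/USACO-Bronze- | UB11-Mixing-Milk/main.py | calcTotalPrice
-- ===== SOURCE A (Python) =====
-- def calcTotalPrice(farmers, numUnits):
-- 	# loop through sorted dictionary until numUnits is reached
-- 	totalUnits = 0
-- 	totalPrice = 0
--
-- 	for price in sorted(farmers.keys()):
-- 		# calculate number of units offered at this price
-- 		units = 0
-- 		for i in farmers[price]:
-- 			units += i
--
-- 		# check if units remaining is less than units this farmer offers
-- 		# if so, only buy as many units as needed, otherwise buy all
-- 		remainingUnits = numUnits - totalUnits
-- 		if remainingUnits < units: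
-- 			totalPrice += remainingUnits * price
-- 			break
-- 		else:
-- 			totalUnits += units
-- 			totalPrice += units*price
--
-- 	return totalPrice
-- ===== SOURCE B (Python) =====
-- def calcTotalPrice(farmers, numUnits):
--     # boundary-search decomposition: prefix sums + first group exceeding numUnits
--     prices = sorted(farmers)
--     units = [sum(farmers[p]) for p in prices]
--     cums = [0]
--     for u in units:
--         cums.append(cums[-1] + u)
--     k = next((i for i in range(len(prices)) if cums[i + 1] > numUnits), len(prices))
--     full = sum(p * u for p, u in zip(prices[:k], units[:k]))
--     if k < len(prices):
--         return full + (numUnits - cums[k]) * prices[k]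
--     return full
-- ===== Notes on version B (the rewrite author's own statement) =====
-- stated objective: alternative
-- what changed: Replaces A's single accumulating loop with early break by a boundary-search decomposition: build per-price unit sums and prefix sums, find the first group whose cumulative total strictly exceeds numUnits, sum full-group costs before it and add one partial purchase at the boundary.
import Mathlib
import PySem

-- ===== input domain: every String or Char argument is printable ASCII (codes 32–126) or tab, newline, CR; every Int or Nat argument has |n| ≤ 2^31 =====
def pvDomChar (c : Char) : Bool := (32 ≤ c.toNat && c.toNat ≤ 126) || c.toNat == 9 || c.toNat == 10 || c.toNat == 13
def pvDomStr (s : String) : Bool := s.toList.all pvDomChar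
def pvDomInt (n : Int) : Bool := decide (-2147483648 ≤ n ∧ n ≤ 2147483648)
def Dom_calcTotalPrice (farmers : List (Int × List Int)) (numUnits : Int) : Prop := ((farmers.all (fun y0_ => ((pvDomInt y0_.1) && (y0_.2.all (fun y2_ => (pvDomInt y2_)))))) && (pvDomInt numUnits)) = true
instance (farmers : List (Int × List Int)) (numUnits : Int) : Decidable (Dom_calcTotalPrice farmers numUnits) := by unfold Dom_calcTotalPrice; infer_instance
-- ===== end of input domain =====

-- B replaces A's break-out accumulating loop by a prefix-sum boundary search; same cost, different decomposition.
-- shared dict primitive: farmers[p] = value at the first matching key (Python dict lookup on the association list)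
def pyLookup (farmers : List (Int × List Int)) (p : Int) : List Int :=
  (((farmers.find? (fun kv => kv.1 == p)).map (·.2)).getD [])

-- ===== PORT A =====
def goA (farmers : List (Int × List Int)) (numUnits : Int) : List Int → Int → Int → Int
  | [], _, totalPrice => totalPrice
  | price :: rest, totalUnits, totalPrice =>
    let units := (pyLookup farmers price).foldl (fun u i => u + i) 0
    let remainingUnits := numUnits - totalUnits
    if remainingUnits < units then totalPrice + remainingUnits * price
    else goA farmers numUnits rest (totalUnits + units) (totalPrice + units * price)

def calcTotalPrice (farmers : List (Int × List Int)) (numUnits : Int) : Int :=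
  goA farmers numUnits
    (PySem.List.sorted (PySem.List.dedup (farmers.map (·.1))) (fun x => x) false) 0 0

-- ===== PORT B =====
-- cums built incrementally from the running last element (Source B's cums, without the leading 0)
def cumScan (c : Int) : List Int → List Int
  | [] => []
  | u :: us => (c + u) :: cumScan (c + u) us

def calcTotalPrice_alt (farmers : List (Int × List Int)) (numUnits : Int) : Int :=
  let prices := PySem.List.sorted (PySem.List.dedup (farmers.map (·.1))) (fun x => x) false
  let units := prices.map (fun p => (pyLookup farmers p).sum)
  let cums1 := cumScan 0 units        -- Source B's cums = 0 :: cums1; cums[i+1] = cums1[i]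
  let k := (cums1.findIdx? (fun c => decide (numUnits < c))).getD prices.length
  let full := ((prices.take k).zip (units.take k)).foldl (fun s pu => s + pu.1 * pu.2) 0
  if k < prices.length then
    full + (numUnits - (0 :: cums1).getD k 0) * prices.getD k 0
  else full

-- ===== PRECONDITION & SPEC =====
def Spec_calcTotalPrice (farmers : List (Int × List Int)) (numUnits : Int) (out : Int) : Prop := out = calcTotalPrice_alt farmers numUnits
instance (farmers : List (Int × List Int)) (numUnits : Int) (out : Int) : Decidable (Spec_calcTotalPrice farmers numUnits out) := by unfold Spec_calcTotalPrice; infer_instance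

-- ===== CLAIM (what is proved, stated in full; the proofs are below) =====
def Claim_equal_calcTotalPrice : Prop := ∀ (farmers : List (Int × List Int)) (numUnits : Int), Dom_calcTotalPrice farmers numUnits → Spec_calcTotalPrice farmers numUnits (calcTotalPrice farmers numUnits)

-- ===== LEMMAS AND PROOFS =====

-- B's body, generalized over the starting cumulative total tU (proof helper)
def Bgen (farmers : List (Int × List Int)) (numUnits : Int) (prices : List Int) (tU : Int) : Int :=
  let units := prices.map (fun p => (pyLookup farmers p).sum)
  let cums1 := cumScan tU units
  let k := (cums1.findIdx? (fun c => decide (numUnits < c))).getD prices.length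
  let full := ((prices.take k).zip (units.take k)).foldl (fun s pu => s + pu.1 * pu.2) 0
  if k < prices.length then
    full + (numUnits - (tU :: cums1).getD k 0) * prices.getD k 0
  else full

theorem foldl_add_shift (l : List Int) (a : Int) :
    l.foldl (fun u i => u + i) a = a + l.foldl (fun u i => u + i) 0 := by
  induction l generalizing a with
  | nil => simp
  | cons x xs ih => simp only [List.foldl_cons]; rw [ih, ih (0 + x)]; ring

theorem foldl_mul_shift (l : List (Int × Int)) (a : Int) :
    l.foldl (fun s pu => s + pu.1 * pu.2) a = a + l.foldl (fun s pu => s + pu.1 * pu.2) 0 := by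
  induction l generalizing a with
  | nil => simp
  | cons x xs ih => simp only [List.foldl_cons]; rw [ih, ih (0 + x.1 * x.2)]; ring

theorem foldl_add_eq_sum (l : List Int) : l.foldl (fun u i => u + i) 0 = l.sum := by
  induction l with
  | nil => simp
  | cons x xs ih => rw [List.foldl_cons, foldl_add_shift, ih]; simp [List.sum_cons]

theorem goA_eq_Bgen (farmers : List (Int × List Int)) (numUnits : Int)
    (prices : List Int) (tU tP : Int) :
    goA farmers numUnits prices tU tP = tP + Bgen farmers numUnits prices tU := by
  induction prices generalizing tU tP with
  | nil => simp [goA, Bgen]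
  | cons p rest ih =>
    simp only [goA, Bgen, List.map_cons, cumScan, List.findIdx?_cons, foldl_add_eq_sum]
    by_cases h : numUnits - tU < (pyLookup farmers p).sum
    · have hd : decide (numUnits < tU + (pyLookup farmers p).sum) = true := by
        simp; omega
      rw [if_pos h, hd]
      simp only [if_true, Option.getD_some, List.take_zero, List.zip_nil_left,
        List.foldl_nil, List.length_cons, List.getD_cons_zero]
      rw [if_pos (Nat.succ_pos rest.length)]
      ring
    · have hd : decide (numUnits < tU + (pyLookup farmers p).sum) = false := by
        simp; omega
      rw [if_neg h, hd, ih]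
      simp only [Bool.false_eq_true, if_false, Bgen]
      cases hfi : List.findIdx? (fun c => decide (numUnits < c))
          (cumScan (tU + (pyLookup farmers p).sum) (rest.map (fun q => (pyLookup farmers q).sum))) with
      | none =>
        simp only [Option.map_none, Option.getD_none, List.length_cons,
          List.take_succ_cons, List.zip_cons_cons, List.foldl_cons]
        rw [if_neg (by omega : ¬ (rest.length + 1 < rest.length + 1)),
            if_neg (by omega : ¬ (rest.length < rest.length))]
        rw [foldl_mul_shift _ (0 + p * (pyLookup farmers p).sum)]
        ring
      | some k' =>
        simp only [Option.map_some, Option.getD_some, List.take_succ_cons,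
          List.zip_cons_cons, List.foldl_cons, List.length_cons]
        rw [foldl_mul_shift _ (0 + p * (pyLookup farmers p).sum)]
        by_cases hk : k' < rest.length
        · rw [if_pos (by omega : k' + 1 < rest.length + 1), if_pos hk]
          simp only [List.getD_cons_succ]
          ring
        · rw [if_neg (by omega : ¬ (k' + 1 < rest.length + 1)), if_neg hk]
          ring

theorem calc_eq_alt (farmers : List (Int × List Int)) (numUnits : Int) :
    calcTotalPrice farmers numUnits = calcTotalPrice_alt farmers numUnits := by
  unfold calcTotalPrice calcTotalPrice_alt
  rw [goA_eq_Bgen]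
  simp only [Bgen]
  ring

-- ===== VERDICT (by name: the statement is the Claim_ definition above) =====
theorem calcTotalPrice_spec : Claim_equal_calcTotalPrice := by
  intro farmers numUnits _
  unfold Spec_calcTotalPrice
  exact calc_eq_alt farmers numUnits
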